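-- pv_equiv track=rewrite | github.com/pronad1/PYTHON_CODEs | beautiful_array.py | find_beautiful_array
-- ===== SOURCE A (Python) =====
-- def find_beautiful_array(input_mean, input_median):
--     for array_length in range(1, 1001):
--         candidate_array = [input_median] * array_length
--
--
--         required_sum = input_mean * array_length
--         current_sum = sum(candidate_array)
--         remaining_difference = required_sum - current_sum
--
--         if abs(remaining_difference) <= (10 ** 6) * (array_length - 1):
--             for i in range(array_length - 1):
--                 if remaining_difference == 0:
--                     break
--                 adjustment = min(
--                     max(-10 ** 6 - candidate_array[i], remaining_difference),
--                     10 ** 6 - candidate_array[i]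
--                 )
--                 candidate_array[i] += adjustment
--                 remaining_difference -= adjustment
--
--
--             if remaining_difference == 0:
--                 return array_length, candidate_array
--
--
--     return None, []
-- ===== SOURCE B (Python) =====
-- def find_beautiful_array(input_mean, input_median):
--     # Closed-form analysis of the greedy: O(1) work per candidate length
--     # instead of building and adjusting an O(L) array for every length.
--     LIM = 10 ** 6
--     md = input_median
--     lo, hi = -LIM - md, LIM - md
--     for L in range(1, 1001):
--         d = (input_mean - md) * L
--         if abs(d) > LIM * (L - 1):
--             continue
--         if d == 0:
--             return L, [md] * L
--         if (d > 0 and hi <= 0) or (d < 0 and lo >= 0):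
--             continue
--         step = hi if d > 0 else lo
--         if lo <= d <= hi:
--             k, v = 0, d
--         else:
--             k = (abs(d) - 1) // abs(step)
--             v = d - k * step
--             if not (lo <= v <= hi):
--                 continue
--         if k + 1 > L - 1:
--             continue
--         return L, [md + step] * k + [md + v] + [md] * (L - 1 - k)
--     return None, []
-- ===== Notes on version B (the rewrite author's own statement) =====
-- stated objective: faster
-- what changed: B replaces A's per-length work (building an O(L) array and running the O(L) greedy clamp-and-subtract loop for every candidate length) by an O(1) closed-form feasibility-and-reachability test per length (floor division gives the number of saturated elements and the remainder), constructing the answer array directly only for the first successful length.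
import Mathlib
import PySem

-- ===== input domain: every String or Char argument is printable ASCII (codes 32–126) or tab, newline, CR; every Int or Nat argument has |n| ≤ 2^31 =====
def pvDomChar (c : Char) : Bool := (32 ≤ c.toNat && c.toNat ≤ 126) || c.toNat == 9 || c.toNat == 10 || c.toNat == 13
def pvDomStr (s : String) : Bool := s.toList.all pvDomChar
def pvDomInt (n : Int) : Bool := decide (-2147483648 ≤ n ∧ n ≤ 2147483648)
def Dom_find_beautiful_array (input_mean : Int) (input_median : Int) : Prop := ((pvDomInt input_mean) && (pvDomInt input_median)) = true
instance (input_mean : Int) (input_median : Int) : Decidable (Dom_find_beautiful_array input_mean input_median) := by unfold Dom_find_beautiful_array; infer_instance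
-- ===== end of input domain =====

-- B replaces A's per-length O(L) array build + greedy adjustment loop by an O(1)
-- closed-form success test per candidate length, building the array directly only
-- for the first successful length (objective: faster in the length search; the
-- timing run could not measure a difference at its input sizes).

-- ===== PORT A =====
def pvLIM : Int := 1000000

-- A's inner greedy loop over the first (array_length - 1) elements (each still
-- holding input_median when visited); returns the adjusted prefix and the final
-- remaining_difference.  The `break` on remaining_difference == 0 leaves the
-- rest of the prefix untouched.
def pvAInner (md : Int) : Int → Nat → (List Int × Int)
  | d, 0 => ([], d)
  | d, n + 1 =>
    if d = 0 then (List.replicate (n + 1) md, 0)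
    else
      let adj := min (max (-pvLIM - md) d) (pvLIM - md)
      let r := pvAInner md (d - adj) n
      ((md + adj) :: r.1, r.2)

-- A's outer loop: array_length = L, L+1, … while fuel lasts (1000 iterations).
def pvAGo (m md : Int) : Nat → Nat → Option Int × List Int
  | _, 0 => (none, [])
  | L, fuel + 1 =>
    let candidate := List.replicate L md
    let required := m * (L : Int)
    let current := candidate.sum
    let diff := required - current
    if |diff| ≤ pvLIM * ((L : Int) - 1) then
      let r := pvAInner md diff (L - 1)
      if r.2 = 0 then ((some (L : Int)), r.1 ++ [md])
      else pvAGo m md (L + 1) fuel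
    else pvAGo m md (L + 1) fuel

def find_beautiful_array (input_mean : Int) (input_median : Int) : Option Int × List Int :=
  pvAGo input_mean input_median 1 1000

-- ===== PORT B =====
def pvBGo (m md : Int) : Nat → Nat → Option Int × List Int
  | _, 0 => (none, [])
  | L, fuel + 1 =>
    let lo := -pvLIM - md
    let hi := pvLIM - md
    let d := (m - md) * (L : Int)
    if |d| > pvLIM * ((L : Int) - 1) then pvBGo m md (L + 1) fuel
    else if d = 0 then (some (L : Int), List.replicate L md)
    else if (d > 0 ∧ hi ≤ 0) ∨ (d < 0 ∧ lo ≥ 0) then pvBGo m md (L + 1) fuel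
    else
      let step := if d > 0 then hi else lo
      let kv : Int × Int :=
        if lo ≤ d ∧ d ≤ hi then (0, d)
        else
          let k := PySem.Int.floordiv (|d| - 1) |step|
          (k, d - k * step)
      if ¬ (lo ≤ kv.2 ∧ kv.2 ≤ hi) then pvBGo m md (L + 1) fuel
      else if kv.1 + 1 > (L : Int) - 1 then pvBGo m md (L + 1) fuel
      else (some (L : Int),
            List.replicate kv.1.toNat (md + step) ++ [md + kv.2] ++
            List.replicate (L - 1 - kv.1.toNat) md)

def find_beautiful_array_alt (input_mean : Int) (input_median : Int) : Option Int × List Int :=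
  pvBGo input_mean input_median 1 1000

-- ===== PRECONDITION & SPEC =====
def Spec_find_beautiful_array (input_mean : Int) (input_median : Int) (out : Option Int × List Int) : Prop := out = find_beautiful_array_alt input_mean input_median
instance (input_mean : Int) (input_median : Int) (out : Option Int × List Int) : Decidable (Spec_find_beautiful_array input_mean input_median out) := by unfold Spec_find_beautiful_array; infer_instance

-- ===== CLAIM (what is proved, stated in full; the proofs are below) =====
def Claim_equal_find_beautiful_array : Prop := ∀ (input_mean : Int) (input_median : Int), Dom_find_beautiful_array input_mean input_median → Spec_find_beautiful_array input_mean input_median (find_beautiful_array input_mean input_median)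

-- ===== LEMMAS AND PROOFS =====

theorem pvAInner_zero (md : Int) (n : Nat) : pvAInner md 0 n = (List.replicate n md, 0) := by
  cases n <;> simp [pvAInner]

theorem pvAInner_neg (md d : Int) (n : Nat) :
    pvAInner (-md) (-d) n = ((pvAInner md d n).1.map (fun x => -x), -(pvAInner md d n).2) := by
  induction n generalizing d with
  | zero => simp [pvAInner]
  | succ n ih =>
    have hP : (0:Int) < pvLIM := by decide
    by_cases hd : d = 0
    · simp [pvAInner, hd]
    · have hd' : ¬ (-d = 0) := by omega
      simp only [pvAInner, if_neg hd, if_neg hd']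
      have hadj : min (max (-pvLIM - -md) (-d)) (pvLIM - -md)
          = -(min (max (-pvLIM - md) d) (pvLIM - md)) := by omega
      rw [hadj]
      have : -d - -(min (max (-pvLIM - md) d) (pvLIM - md))
          = -(d - min (max (-pvLIM - md) d) (pvLIM - md)) := by ring
      rw [this, ih]
      simp
      ring

-- one step lands in [lo, hi]: a single adjustment finishes
theorem pvAInner_in_range (md d : Int) (n : Nat)
    (h1 : -pvLIM - md ≤ d) (h2 : d ≤ pvLIM - md) (hd : d ≠ 0) (hn : 1 ≤ n) :
    pvAInner md d n = ((md + d) :: List.replicate (n - 1) md, 0) := by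
  have hP : (0:Int) < pvLIM := by decide
  obtain ⟨n', rfl⟩ : ∃ n', n = n' + 1 := ⟨n - 1, by omega⟩
  have hadj : min (max (-pvLIM - md) d) (pvLIM - md) = d := by omega
  simp [pvAInner, hd, hadj, pvAInner_zero]

-- success with k full descents by hi then the remainder
theorem pvAInner_descend_succ (md : Int) (k : Nat) :
    ∀ (d : Int) (n : Nat), 0 < pvLIM - md →
    -pvLIM - md ≤ d - k * (pvLIM - md) → 0 < d - k * (pvLIM - md) →
    d - k * (pvLIM - md) ≤ pvLIM - md → k + 1 ≤ n →
    pvAInner md d n = (List.replicate k (md + (pvLIM - md)) ++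
      (md + (d - k * (pvLIM - md))) :: List.replicate (n - k - 1) md, 0) := by
  induction k with
  | zero =>
    intro d n hhi h1 h2 h3 hn
    simp only [Nat.cast_zero, zero_mul, sub_zero] at h1 h2 h3
    simpa using pvAInner_in_range md d n h1 h3 (by omega) (by omega)
  | succ k ih =>
    intro d n hhi h1 h2 h3 hn
    have hP : (0:Int) < pvLIM := by decide
    have hk : ((k + 1 : Nat) : Int) * (pvLIM - md) = k * (pvLIM - md) + (pvLIM - md) := by
      push_cast; ring
    rw [hk] at h1 h2 h3
    have hkpos : (0 : Int) ≤ (k : Int) * (pvLIM - md) := by positivity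
    have hdhi : pvLIM - md < d := by omega
    obtain ⟨n', rfl⟩ : ∃ n', n = n' + 1 := ⟨n - 1, by omega⟩
    have hd0 : d ≠ 0 := by omega
    have hadj : min (max (-pvLIM - md) d) (pvLIM - md) = pvLIM - md := by omega
    simp only [pvAInner, if_neg hd0, hadj]
    rw [ih (d - (pvLIM - md)) n' hhi (by omega) (by omega) (by omega) (by omega)]
    have harg : d - (pvLIM - md) - k * (pvLIM - md) = d - (k + 1 : Nat) * (pvLIM - md) := by
      push_cast; ring
    rw [harg]
    simp [List.replicate_succ]

-- not enough steps: after n descents the difference is still positive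
theorem pvAInner_descend_short (md : Int) (n : Nat) :
    ∀ d : Int, 0 < pvLIM - md → 0 < d - n * (pvLIM - md) →
    (pvAInner md d n).2 = d - n * (pvLIM - md) := by
  induction n with
  | zero => intro d _ _; simp [pvAInner]
  | succ n ih =>
    intro d hhi h
    have hP : (0:Int) < pvLIM := by decide
    have hk : ((n + 1 : Nat) : Int) * (pvLIM - md) = n * (pvLIM - md) + (pvLIM - md) := by
      push_cast; ring
    rw [hk] at h
    have hkpos : (0 : Int) ≤ (n : Int) * (pvLIM - md) := by positivity
    have hd0 : d ≠ 0 := by omega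
    have hadj : min (max (-pvLIM - md) d) (pvLIM - md) = pvLIM - md := by omega
    simp only [pvAInner, if_neg hd0, hadj]
    rw [ih (d - (pvLIM - md)) hhi (by omega)]
    push_cast; ring

-- lo > 0, negative difference: it only gets more negative
theorem pvAInner_neg_stuck (md : Int) (n : Nat) :
    ∀ d : Int, 0 < -pvLIM - md → d < 0 → (pvAInner md d n).2 < 0 := by
  induction n with
  | zero => intro d _ h; simpa [pvAInner] using h
  | succ n ih =>
    intro d hlo h
    have hP : (0:Int) < pvLIM := by decide
    have hd0 : d ≠ 0 := by omega
    have hadj : min (max (-pvLIM - md) d) (pvLIM - md) = -pvLIM - md := by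
      have : (-pvLIM - md) ≤ pvLIM - md := by unfold pvLIM at *; omega
      omega
    simp only [pvAInner, if_neg hd0, hadj]
    exact ih _ hlo (by omega)

-- hi ≤ 0, positive difference: it never decreases
theorem pvAInner_pos_stuck (md : Int) (n : Nat) :
    ∀ d : Int, pvLIM - md ≤ 0 → 0 < d → 0 < (pvAInner md d n).2 := by
  induction n with
  | zero => intro d _ h; simpa [pvAInner] using h
  | succ n ih =>
    intro d hhi h
    have hd0 : d ≠ 0 := by omega
    simp only [pvAInner, if_neg hd0]
    have hadj : min (max (-pvLIM - md) d) (pvLIM - md) ≤ pvLIM - md := min_le_right _ _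
    exact ih _ hhi (by omega)

-- descents land strictly below lo (with lo > 0): never reaches 0
theorem pvAInner_land_low (md : Int) (n : Nat) :
    ∀ (d k : Int), 0 < pvLIM - md → 0 < -pvLIM - md → 0 ≤ k →
    0 < d - k * (pvLIM - md) → d - k * (pvLIM - md) < -pvLIM - md →
    (pvAInner md d n).2 ≠ 0 := by
  induction n with
  | zero =>
    intro d k hhi hlo hk h1 h2
    have hP : (0:Int) < pvLIM := by decide
    have : (0:Int) ≤ k * (pvLIM - md) := by positivity
    simp only [pvAInner]
    omega
  | succ n ih =>
    intro d k hhi hlo hk h1 h2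
    have hP : (0:Int) < pvLIM := by decide
    have hkpos : (0:Int) ≤ k * (pvLIM - md) := by positivity
    have hd0 : d ≠ 0 := by omega
    by_cases hcase : d ≤ pvLIM - md
    · -- forces k = 0, hence 0 < d < lo: one step makes it negative, stuck
      have hk0 : k = 0 := by nlinarith
      subst hk0
      simp only [zero_mul, sub_zero] at h1 h2
      have hadj : min (max (-pvLIM - md) d) (pvLIM - md) = -pvLIM - md := by
        have : (-pvLIM - md) ≤ pvLIM - md := by omega
        omega
      simp only [pvAInner, if_neg hd0, hadj]
      have := pvAInner_neg_stuck md n (d - (-pvLIM - md)) hlo (by omega)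
      omega
    · have hk1 : 1 ≤ k := by nlinarith
      have hadj : min (max (-pvLIM - md) d) (pvLIM - md) = pvLIM - md := by omega
      simp only [pvAInner, if_neg hd0, hadj]
      exact ih (d - (pvLIM - md)) (k - 1) hhi hlo (by omega)
        (by nlinarith) (by nlinarith)



-- outer-loop symmetry: negating both inputs negates the array, keeps the length
theorem pvAGo_neg (m md : Int) : ∀ (fuel L : Nat),
    pvAGo (-m) (-md) L fuel = ((pvAGo m md L fuel).1, (pvAGo m md L fuel).2.map (fun x => -x)) := by
  intro fuel
  induction fuel with
  | zero => intro L; rfl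
  | succ fuel ih =>
    intro L
    have hsum : ∀ (x : Int), (List.replicate L x).sum = (L:Int) * x := by
      intro x; simp [List.sum_replicate]
    simp only [pvAGo, hsum]
    rw [show -m * (L:Int) - (L:Int) * -md = -(m * (L:Int) - (L:Int) * md) from by ring]
    generalize (m * (L:Int) - (L:Int) * md) = D
    rw [abs_neg]
    by_cases hfe : |D| ≤ pvLIM * ((L:Int) - 1)
    · simp only [if_pos hfe]
      rw [pvAInner_neg]
      by_cases h0 : (pvAInner md D (L-1)).2 = 0
      · simp [h0]
      · simp only [if_neg h0, if_neg (show ¬ -(pvAInner md D (L-1)).2 = 0 from by omega)]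
        exact ih (L+1)
    · simp only [if_neg hfe]
      exact ih (L+1)

theorem pvBGo_neg (m md : Int) : ∀ (fuel L : Nat),
    pvBGo (-m) (-md) L fuel = ((pvBGo m md L fuel).1, (pvBGo m md L fuel).2.map (fun x => -x)) := by
  intro fuel
  induction fuel with
  | zero => intro L; rfl
  | succ fuel ih =>
    intro L
    have hP : (0:Int) < pvLIM := by decide
    simp only [pvBGo]
    rw [show (-m - -md) * (L:Int) = -((m - md) * (L:Int)) from by ring]
    generalize (m - md) * (L:Int) = D
    rw [abs_neg]
    by_cases hfe : |D| > pvLIM * ((L:Int) - 1)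
    · simp only [if_pos hfe]; exact ih (L+1)
    simp only [if_neg hfe]
    by_cases h0 : D = 0
    · simp [h0]
    simp only [if_neg h0, if_neg (show ¬ -D = 0 from by omega)]
    by_cases hstk : (D > 0 ∧ pvLIM - md ≤ 0) ∨ (D < 0 ∧ -pvLIM - md ≥ 0)
    · simp only [if_pos hstk,
        if_pos (show (-D > 0 ∧ pvLIM - -md ≤ 0) ∨ (-D < 0 ∧ -pvLIM - -md ≥ 0) from by omega)]
      exact ih (L+1)
    simp only [if_neg hstk,
      if_neg (show ¬ ((-D > 0 ∧ pvLIM - -md ≤ 0) ∨ (-D < 0 ∧ -pvLIM - -md ≥ 0)) from by omega)]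
    have hstep : (if -D > 0 then pvLIM - -md else -pvLIM - -md)
        = -(if D > 0 then pvLIM - md else -pvLIM - md) := by
      rcases lt_trichotomy D 0 with h | h | h
      · rw [if_pos (by omega), if_neg (by omega)]; ring
      · exact absurd h h0
      · rw [if_neg (by omega), if_pos h]; ring
    rw [hstep]
    generalize (if D > 0 then pvLIM - md else -pvLIM - md) = step
    rw [abs_neg]
    by_cases hin : -pvLIM - md ≤ D ∧ D ≤ pvLIM - md
    · simp only [if_pos hin,
        if_pos (show -pvLIM - -md ≤ -D ∧ -D ≤ pvLIM - -md from by omega)]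
      simp only [if_neg (not_not_intro hin),
        if_neg (not_not_intro (show -pvLIM - -md ≤ -D ∧ -D ≤ pvLIM - -md from by omega))]
      by_cases hlen : (0:Int) + 1 > (L:Int) - 1
      · simp only [if_pos hlen]; exact ih (L+1)
      · simp only [if_neg hlen]
        simp
        omega
    · simp only [if_neg hin,
        if_neg (show ¬ (-pvLIM - -md ≤ -D ∧ -D ≤ pvLIM - -md) from by omega)]
      rw [show -D - PySem.Int.floordiv (|D| - 1) |step| * -step
          = -(D - PySem.Int.floordiv (|D| - 1) |step| * step) from by ring]
      generalize hv : D - PySem.Int.floordiv (|D| - 1) |step| * step = v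
      generalize PySem.Int.floordiv (|D| - 1) |step| = k at hv ⊢
      by_cases hvr : -pvLIM - md ≤ v ∧ v ≤ pvLIM - md
      · simp only [if_neg (not_not_intro hvr),
          if_neg (not_not_intro (show -pvLIM - -md ≤ -v ∧ -v ≤ pvLIM - -md from by omega))]
        by_cases hlen : k + 1 > (L:Int) - 1
        · simp only [if_pos hlen]; exact ih (L+1)
        · simp only [if_neg hlen]
          simp
          rw [add_comm (-md) (-step), add_comm (-md) (-v)]
      · simp only [if_pos hvr,
          if_pos (show ¬ (-pvLIM - -md ≤ -v ∧ -v ≤ pvLIM - -md) from by omega)]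
        exact ih (L+1)

-- the two loops agree step by step when input_mean - input_median ≥ 0
theorem pvGo_eq_nonneg (m md : Int) (hm : md ≤ m) :
    ∀ (fuel L : Nat), 1 ≤ L → pvAGo m md L fuel = pvBGo m md L fuel := by
  intro fuel
  induction fuel with
  | zero => intro L _; rfl
  | succ fuel ih =>
    intro L hL
    obtain ⟨n, rfl⟩ : ∃ n, L = n + 1 := ⟨L - 1, by omega⟩
    have hP : (0:Int) < pvLIM := by decide
    have hsum : ∀ (x : Int), (List.replicate (n+1) x).sum = ((n+1:Nat):Int) * x := by
      intro x; simp [List.sum_replicate]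
    have hdnn : 0 ≤ (m - md) * ((n+1:Nat):Int) := mul_nonneg (by omega) (by positivity)
    simp only [pvAGo, pvBGo, hsum]
    rw [show m * ((n+1:Nat):Int) - ((n+1:Nat):Int) * md = (m - md) * ((n+1:Nat):Int) from by ring]
    generalize hg : (m - md) * ((n+1:Nat):Int) = d
    rw [hg] at hdnn
    rw [show ((n+1) - 1 : Nat) = n from rfl]
    by_cases hfe : |d| ≤ pvLIM * (((n+1:Nat):Int) - 1)
    · simp only [if_pos hfe, if_neg (show ¬ |d| > pvLIM * (((n+1:Nat):Int) - 1) from by omega)]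
      by_cases h0 : d = 0
      · rw [h0, pvAInner_zero]
        simp [List.replicate_succ']
      · have hdpos : 0 < d := by omega
        have hfen : (1:Int) ≤ (n:Int) := by
          by_contra hcon
          have h1 : (n:Int) = 0 := by omega
          rw [show (((n+1:Nat)):Int) = (n:Int) + 1 from by push_cast; ring, h1] at hfe
          simp at hfe
          omega
        simp only [if_neg h0]
        by_cases hstk : pvLIM - md ≤ 0
        · simp only [if_pos (show (d > 0 ∧ pvLIM - md ≤ 0) ∨ (d < 0 ∧ -pvLIM - md ≥ 0)
              from Or.inl ⟨hdpos, hstk⟩)]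
          have h2 := pvAInner_pos_stuck md n d hstk hdpos
          rw [if_neg (by omega)]
          exact ih (n+2) (by omega)
        · have hhi : 0 < pvLIM - md := by omega
          simp only [if_neg (show ¬ ((d > 0 ∧ pvLIM - md ≤ 0) ∨ (d < 0 ∧ -pvLIM - md ≥ 0))
              from by omega)]
          rw [if_pos hdpos]
          by_cases hin : -pvLIM - md ≤ d ∧ d ≤ pvLIM - md
          · simp only [if_pos hin]
            simp only [if_neg (not_not_intro hin)]
            rw [if_neg (show ¬ ((0:Int) + 1 > ((n+1:Nat):Int) - 1) from by push_cast; omega)]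
            rw [pvAInner_in_range md d n hin.1 hin.2 h0 (by omega)]
            rw [if_pos rfl]
            have harr : ((md + d) :: List.replicate (n-1) md) ++ [md]
                = List.replicate (Int.toNat 0) (md + (pvLIM - md)) ++ [md + d]
                  ++ List.replicate (n - Int.toNat 0) md := by
              simp
              rw [← List.replicate_succ']
              congr 1
              omega
            rw [harr]
          · -- d outside [lo, hi]: B computes k and v by floor division
            simp only [if_neg hin]
            have habs : |d| = d := abs_of_pos hdpos
            have habs2 : |pvLIM - md| = pvLIM - md := abs_of_pos hhi
            rw [habs, habs2]
            have hkspec := PySem.Int.floordiv_mul_add_mod (d - 1) (pvLIM - md)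
            have hmod1 := PySem.Int.mod_nonneg (d - 1) hhi
            have hmod2 := PySem.Int.mod_lt (d - 1) hhi
            generalize hk : PySem.Int.floordiv (d - 1) (pvLIM - md) = k at hkspec ⊢
            generalize hmr : PySem.Int.mod (d - 1) (pvLIM - md) = r at hmod1 hmod2 hkspec
            -- bounds: k*(hi) ≤ d-1 < (k+1)*(hi)
            have hb1 : k * (pvLIM - md) ≤ d - 1 := by omega
            have hb2 : d - 1 < (k + 1) * (pvLIM - md) := by
              have : (k+1) * (pvLIM - md) = k * (pvLIM - md) + (pvLIM - md) := by ring
              omega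
            have hknn : 0 ≤ k := by nlinarith
            have hv1 : 0 < d - k * (pvLIM - md) := by omega
            have hv2 : d - k * (pvLIM - md) ≤ pvLIM - md := by
              have : (k+1) * (pvLIM - md) = k * (pvLIM - md) + (pvLIM - md) := by ring
              omega
            by_cases hvr : -pvLIM - md ≤ d - k * (pvLIM - md)
            · have hcnd : ¬ ¬ (-pvLIM - md ≤ d - k * (pvLIM - md) ∧ d - k * (pvLIM - md) ≤ pvLIM - md) := not_not_intro ⟨hvr, hv2⟩
              simp only [if_neg hcnd]
              by_cases hlen : k + 1 > ((n+1:Nat):Int) - 1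
              · simp only [if_pos hlen]
                have hsh : 0 < d - (n:Int) * (pvLIM - md) := by
                  have hkn : (n:Int) ≤ k := by push_cast at hlen; omega
                  nlinarith
                have := pvAInner_descend_short md n d hhi hsh
                rw [if_neg (by omega)]
                exact ih (n+2) (by omega)
              · simp only [if_neg hlen]
                have hkn : (k.toNat : Int) = k := Int.toNat_of_nonneg hknn
                have hlen' : k.toNat + 1 ≤ n := by push_cast at hlen; omega
                rw [pvAInner_descend_succ md k.toNat d n hhi (by rw [hkn]; exact hvr)
                  (by rw [hkn]; exact hv1) (by rw [hkn]; exact hv2) hlen']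
                rw [if_pos rfl]
                rw [hkn]
                have harr : (List.replicate k.toNat (md + (pvLIM - md))
                      ++ (md + (d - k * (pvLIM - md))) :: List.replicate (n - k.toNat - 1) md) ++ [md]
                    = List.replicate k.toNat (md + (pvLIM - md)) ++ [md + (d - k * (pvLIM - md))]
                      ++ List.replicate (n - k.toNat) md := by
                  simp [List.append_assoc]
                  rw [← List.replicate_succ']
                  congr 1
                  omega
                rw [harr]
            · -- the remainder lands below lo (so lo > 0): the greedy never reaches 0
              simp only [if_pos (show ¬ (-pvLIM - md ≤ d - k * (pvLIM - md)
                  ∧ d - k * (pvLIM - md) ≤ pvLIM - md) from by omega)]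
              have hlo : 0 < -pvLIM - md := by omega
              have := pvAInner_land_low md n d k hhi hlo hknn hv1 (by omega)
              rw [if_neg this]
              exact ih (n+2) (by omega)
    · simp only [if_neg hfe,
        if_pos (show |d| > pvLIM * (((n+1:Nat):Int) - 1) from by omega)]
      exact ih (n+2) (by omega)

-- ===== VERDICT (by name: the statement is the Claim_ definition above) =====
theorem find_beautiful_array_spec : Claim_equal_find_beautiful_array := by
  intro m md _
  unfold Spec_find_beautiful_array find_beautiful_array find_beautiful_array_alt
  by_cases hm : md ≤ m
  · exact pvGo_eq_nonneg m md hm 1000 1 (by omega)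
  · have h1 := pvAGo_neg (-m) (-md) 1000 1
    have h2 := pvBGo_neg (-m) (-md) 1000 1
    simp only [neg_neg] at h1 h2
    rw [h1, h2, pvGo_eq_nonneg (-m) (-md) (by omega) 1000 1 (by omega)]
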